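-- pv_equiv track=rewrite | github.com/HeleneRL/my-project | libs/dasprocessor/bearing_tools.py | select_packets_by_coverage
-- ===== SOURCE A (Python) =====
-- from typing import Dict, Iterable, List, Mapping, Optional, Sequence, Tuple, Union
--
-- def packet_coverage_counts(
--     arrivals: Mapping[int, Mapping[int, int]],
--     subarrays: Mapping[int, Sequence[int]],
--     packet_indices: Optional[Iterable[int]] = None
-- ) -> Dict[int, int]:
--     """
--     Count how many subarrays have >=1 detection (in any element) for each packet.
--
--     Returns
--     -------
--     {packet_idx: count_of_subarrays_with_at_least_one_detection}
--     """
--     # build set of packets to consider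
--     if packet_indices is None:
--         pk_all = set()
--         for ch_map in arrivals.values():
--             pk_all.update(ch_map.keys())
--         packet_indices = sorted(pk_all)
--
--     coverage: Dict[int, int] = {int(k): 0 for k in packet_indices}
--     for _, chans in subarrays.items():
--         present = set()
--         for ch in chans:
--             present.update(arrivals.get(ch, {}).keys())
--         for k in present:
--             if k in coverage:
--                 coverage[int(k)] += 1
--     return coverage
--
-- def select_packets_by_coverage(
--     arrivals: Mapping[int, Mapping[int, int]],
--     subarrays: Mapping[int, Sequence[int]],
--     min_subarrays: int = 2,
--     limit: Optional[int] = None,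
--     packet_indices: Optional[Iterable[int]] = None
-- ) -> List[int]:
--     """
--     Return packet indices that are seen by at least `min_subarrays` subarrays,
--     sorted by coverage (desc). Optional `limit` restricts how many to return.
--     """
--     cov = packet_coverage_counts(arrivals, subarrays, packet_indices)
--     ranked = sorted([k for k, n in cov.items() if n >= min_subarrays],
--                     key=lambda k: cov[k], reverse=True)
--     return ranked if limit is None else ranked[:limit]
-- ===== SOURCE B (Python) =====
-- def select_packets_by_coverage(arrivals, subarrays, min_subarrays=2, limit=None, packet_indices=None):
--     if packet_indices is None:
--         packet_indices = sorted({k for ch_map in arrivals.values() for k in ch_map})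
--     seen = {int(k): set() for k in packet_indices}
--
--     # inverted index: channel -> ids of the subarrays containing it
--     chan_subs = {}
--     for sid, chans in subarrays.items():
--         for ch in chans:
--             chan_subs.setdefault(ch, set()).add(sid)
--
--     # one pass over the arrivals: packet k is covered by every subarray of a channel that saw it
--     for ch, pkts in arrivals.items():
--         for k in pkts:
--             if k in seen:
--                 seen[k].update(chan_subs.get(ch, ()))
--
--     cov = {k: len(s) for k, s in seen.items()}
--     ranked = sorted((k for k in cov if cov[k] >= min_subarrays),
--                     key=cov.get, reverse=True)
--     return ranked if limit is None else ranked[:limit]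
-- ===== Notes on version B (the rewrite author's own statement) =====
-- stated objective: alternative
-- what changed: Inverts the data flow with an inverted index: instead of building a per-subarray 'present' packet set and bumping a counter dict, B builds a channel->subarray-ids index once, makes a single pass over the arrivals collecting for each packet the set of subarray ids that detect it, and takes set sizes as the coverage counts before the same filter and stable reverse sort.
import Mathlib
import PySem

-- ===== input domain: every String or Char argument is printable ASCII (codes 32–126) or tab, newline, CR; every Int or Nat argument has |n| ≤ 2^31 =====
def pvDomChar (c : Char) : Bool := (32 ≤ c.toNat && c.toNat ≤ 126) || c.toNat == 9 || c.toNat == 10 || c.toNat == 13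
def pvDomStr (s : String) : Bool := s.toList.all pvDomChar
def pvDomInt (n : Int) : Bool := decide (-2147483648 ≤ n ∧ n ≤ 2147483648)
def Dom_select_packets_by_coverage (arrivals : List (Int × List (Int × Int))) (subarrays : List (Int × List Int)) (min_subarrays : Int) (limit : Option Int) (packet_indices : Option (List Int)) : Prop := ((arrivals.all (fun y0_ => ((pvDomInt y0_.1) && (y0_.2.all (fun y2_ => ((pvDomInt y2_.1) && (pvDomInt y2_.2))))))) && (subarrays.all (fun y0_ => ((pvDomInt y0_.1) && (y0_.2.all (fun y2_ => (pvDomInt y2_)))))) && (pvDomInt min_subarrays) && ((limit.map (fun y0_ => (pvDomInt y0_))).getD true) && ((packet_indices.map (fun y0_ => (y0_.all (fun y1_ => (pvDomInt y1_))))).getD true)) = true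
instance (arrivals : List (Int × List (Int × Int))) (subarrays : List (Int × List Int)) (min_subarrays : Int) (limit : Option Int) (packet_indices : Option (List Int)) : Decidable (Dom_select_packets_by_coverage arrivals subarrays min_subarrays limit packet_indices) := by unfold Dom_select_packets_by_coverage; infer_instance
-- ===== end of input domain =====

-- B inlines the helper and inverts the loops: instead of A's per-subarray `present` sets
-- that bump a counter dict, B counts for each packet directly the subarrays that detect it
-- (objective: alternative decomposition, same asymptotic cost).
-- Equivalence of the RETURN value is proved for all inputs (both functions are total here).

-- shared input marshalling: the Python dict arguments as PySem dicts
def pvArrOf (arrivals : List (Int × List (Int × Int))) : PySem.Dict Int (PySem.Dict Int Int) :=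
  PySem.Dict.ofList (arrivals.map (fun p => (p.1, PySem.Dict.ofList p.2)))

-- ===== PORT A =====
-- `pk_all = set(); for ch_map in arrivals.values(): pk_all.update(ch_map.keys()); sorted(pk_all)`
def pvPkAllA (arr : PySem.Dict Int (PySem.Dict Int Int)) : List Int :=
  PySem.List.sorted
    (arr.values.foldl (fun s ch_map => PySem.Set.update s ch_map.keys) PySem.Set.empty)
    (fun x => x) false

-- `present = set(); for ch in chans: present.update(arrivals.get(ch, {}).keys())`
def pvPresentA (arr : PySem.Dict Int (PySem.Dict Int Int)) (chans : List Int) : PySem.Set Int :=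
  chans.foldl (fun s ch => PySem.Set.update s ((arr.getD ch PySem.Dict.empty).keys)) PySem.Set.empty

-- `if k in coverage: coverage[int(k)] += 1`
def pvBumpA (cov : PySem.Dict Int Int) (k : Int) : PySem.Dict Int Int :=
  if cov.contains k then cov.modify k 0 (· + 1) else cov

-- packet_coverage_counts after packet_indices is resolved to the list pk
def pvCovA (arr : PySem.Dict Int (PySem.Dict Int Int)) (subs : PySem.Dict Int (List Int))
    (pk : List Int) : PySem.Dict Int Int :=
  let coverage : PySem.Dict Int Int := pk.foldl (fun d k => d.insert k 0) PySem.Dict.empty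
  subs.items.foldl (fun cov p => (pvPresentA arr p.2).foldl pvBumpA cov) coverage

def select_packets_by_coverage (arrivals : List (Int × List (Int × Int))) (subarrays : List (Int × List Int)) (min_subarrays : Int) (limit : Option Int) (packet_indices : Option (List Int)) : List Int :=
  let arr := pvArrOf arrivals
  let subs : PySem.Dict Int (List Int) := PySem.Dict.ofList subarrays
  let pk : List Int := match packet_indices with
    | none => pvPkAllA arr
    | some l => l
  let cov := pvCovA arr subs pk
  let ranked := PySem.List.sorted
    ((cov.items.filter (fun p => decide (min_subarrays ≤ p.2))).map (·.1))
    (fun k => cov.getD k 0) true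
  match limit with
  | none => ranked
  | some l => PySem.List.slice ranked none (some l)

-- ===== PORT B =====
-- `sorted({k for ch_map in arrivals.values() for k in ch_map})`
def pvPkAllB (arr : PySem.Dict Int (PySem.Dict Int Int)) : List Int :=
  PySem.List.sorted (PySem.Set.ofList (arr.values.flatMap (fun ch_map => ch_map.keys)))
    (fun x => x) false

-- `chan_subs = {}; for sid, chans in subarrays.items(): for ch in chans: chan_subs.setdefault(ch, set()).add(sid)`
-- (setdefault-then-mutate on the stored set is exactly Dict.modify with the empty-set default)
def pvChanSubs (subs : PySem.Dict Int (List Int)) : PySem.Dict Int (PySem.Set Int) :=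
  subs.items.foldl
    (fun d p => p.2.foldl (fun d ch => d.modify ch PySem.Set.empty (fun s => s.add p.1)) d)
    PySem.Dict.empty

-- `seen = {int(k): set() for k in packet_indices}` then
-- `for ch, pkts in arrivals.items(): for k in pkts: if k in seen: seen[k].update(chan_subs.get(ch, ()))`
def pvSeenB (arr : PySem.Dict Int (PySem.Dict Int Int)) (cs : PySem.Dict Int (PySem.Set Int))
    (pk : List Int) : PySem.Dict Int (PySem.Set Int) :=
  let seen0 : PySem.Dict Int (PySem.Set Int) :=
    pk.foldl (fun d k => d.insert k PySem.Set.empty) PySem.Dict.empty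
  arr.items.foldl
    (fun d q => q.2.keys.foldl
      (fun d k => if d.contains k
        then d.modify k PySem.Set.empty (fun s => PySem.Set.update s (cs.getD q.1 PySem.Set.empty))
        else d) d)
    seen0

def select_packets_by_coverage_alt (arrivals : List (Int × List (Int × Int))) (subarrays : List (Int × List Int)) (min_subarrays : Int) (limit : Option Int) (packet_indices : Option (List Int)) : List Int :=
  let arr := pvArrOf arrivals
  let subs : PySem.Dict Int (List Int) := PySem.Dict.ofList subarrays
  let pk : List Int := match packet_indices with
    | none => pvPkAllB arr
    | some l => l
  let seen := pvSeenB arr (pvChanSubs subs) pk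
  -- `cov = {k: len(s) for k, s in seen.items()}`
  let cov : PySem.Dict Int Int := PySem.Dict.ofList (seen.items.map (fun p => (p.1, PySem.Set.len p.2)))
  let ranked := PySem.List.sorted
    (cov.keys.filter (fun k => decide (min_subarrays ≤ cov.getD k 0)))
    (fun k => cov.getD k 0) true
  match limit with
  | none => ranked
  | some l => PySem.List.slice ranked none (some l)

-- ===== PRECONDITION & SPEC =====
def Spec_select_packets_by_coverage (arrivals : List (Int × List (Int × Int))) (subarrays : List (Int × List Int)) (min_subarrays : Int) (limit : Option Int) (packet_indices : Option (List Int)) (out : List Int) : Prop := out = select_packets_by_coverage_alt arrivals subarrays min_subarrays limit packet_indices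
instance (arrivals : List (Int × List (Int × Int))) (subarrays : List (Int × List Int)) (min_subarrays : Int) (limit : Option Int) (packet_indices : Option (List Int)) (out : List Int) : Decidable (Spec_select_packets_by_coverage arrivals subarrays min_subarrays limit packet_indices out) := by unfold Spec_select_packets_by_coverage; infer_instance

-- ===== CLAIM (what is proved, stated in full; the proofs are below) =====
def Claim_equal_select_packets_by_coverage : Prop := ∀ (arrivals : List (Int × List (Int × Int))) (subarrays : List (Int × List Int)) (min_subarrays : Int) (limit : Option Int) (packet_indices : Option (List Int)), Dom_select_packets_by_coverage arrivals subarrays min_subarrays limit packet_indices → Spec_select_packets_by_coverage arrivals subarrays min_subarrays limit packet_indices (select_packets_by_coverage arrivals subarrays min_subarrays limit packet_indices)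

-- ===== LEMMAS AND PROOFS =====

-- proof-side abbreviation: "subarray with channels `chans` detects packet k"
def chansHit (arr : PySem.Dict Int (PySem.Dict Int Int)) (chans : List Int) (k : Int) : Bool :=
  chans.any (fun ch => (arr.getD ch PySem.Dict.empty).contains k)

-- proof-side: the number of subarrays detecting k, and the common normal form of both cov dicts
def cntK (arr : PySem.Dict Int (PySem.Dict Int Int)) (subs : PySem.Dict Int (List Int)) (k : Int) : Int :=
  (subs.items.countP (fun p => chansHit arr p.2 k) : Int)

def covN (arr : PySem.Dict Int (PySem.Dict Int Int)) (subs : PySem.Dict Int (List Int))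
    (pk : List Int) : PySem.Dict Int Int :=
  PySem.Dict.ofList ((PySem.List.dedup pk).map (fun k => (k, cntK arr subs k)))

-- the two None-path packet lists agree: a fold of set.update is set() of the concatenation
lemma pkAll_eq (arr : PySem.Dict Int (PySem.Dict Int Int)) : pvPkAllA arr = pvPkAllB arr := by
  unfold pvPkAllA pvPkAllB
  congr 1
  have h : ∀ (vs : List (PySem.Dict Int Int)) (s : PySem.Set Int),
      vs.foldl (fun s ch_map => PySem.Set.update s ch_map.keys) s
        = PySem.Set.update s (vs.flatMap (fun ch_map => ch_map.keys)) := by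
    intro vs
    induction vs with
    | nil => intro s; simp [PySem.Set.update]
    | cons v t ih =>
        intro s
        rw [List.foldl_cons, List.flatMap_cons, ih (PySem.Set.update s v.keys)]
        simp [PySem.Set.update, List.foldl_append]
  simpa [PySem.Set.ofList, PySem.Set.update] using h arr.values PySem.Set.empty

-- membership in A's `present` set = the any-channel test
lemma present_contains (arr : PySem.Dict Int (PySem.Dict Int Int)) (chans : List Int) (k : Int) :
    (k ∈ pvPresentA arr chans) ↔ (chansHit arr chans k = true) := by
  unfold pvPresentA chansHit
  have h : ∀ (cs : List Int) (s : PySem.Set Int),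
      k ∈ cs.foldl (fun s ch => PySem.Set.update s ((arr.getD ch PySem.Dict.empty).keys)) s
        ↔ k ∈ s ∨ ∃ ch ∈ cs, k ∈ (arr.getD ch PySem.Dict.empty).keys := by
    intro cs
    induction cs with
    | nil => intro s; simp
    | cons c t ih =>
        intro s
        simp only [List.foldl_cons, ih, PySem.Set.mem_update, List.mem_cons]
        constructor
        · rintro (⟨h1 | h1⟩ | ⟨ch, hch, hk⟩)
          · exact Or.inl h1
          · exact Or.inr ⟨c, Or.inl rfl, h1⟩
          · exact Or.inr ⟨ch, Or.inr hch, hk⟩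
        · rintro (h1 | ⟨ch, (rfl | hch), hk⟩)
          · exact Or.inl (Or.inl h1)
          · exact Or.inl (Or.inr hk)
          · exact Or.inr ⟨ch, hch, hk⟩
  rw [h chans PySem.Set.empty]
  simp [List.any_eq_true, PySem.Dict.contains_iff_mem_keys, PySem.Set.empty]

lemma present_nodup (arr : PySem.Dict Int (PySem.Dict Int Int)) (chans : List Int) :
    (pvPresentA arr chans).Nodup := by
  unfold pvPresentA
  have h : ∀ (cs : List Int) (s : PySem.Set Int), s.Nodup →
      (cs.foldl (fun s ch => PySem.Set.update s ((arr.getD ch PySem.Dict.empty).keys)) s).Nodup := by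
    intro cs
    induction cs with
    | nil => intro s hs; simpa using hs
    | cons c t ih =>
        intro s hs
        exact ih _ (PySem.Set.nodup_update _ _ hs)
  exact h chans PySem.Set.empty List.nodup_nil

-- pvBumpA preserves contains and keys
lemma bump_contains (cov : PySem.Dict Int Int) (k k' : Int) :
    (pvBumpA cov k).contains k' = cov.contains k' := by
  unfold pvBumpA
  split
  · rename_i hc
    rw [PySem.Dict.contains_modify]
    by_cases h : k' = k
    · subst h; simp [hc]
    · simp [h]
  · rfl

lemma bump_keys (cov : PySem.Dict Int Int) (k : Int) :
    (pvBumpA cov k).keys = cov.keys := by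
  unfold pvBumpA
  split
  · rename_i hc
    rw [PySem.Dict.keys_modify, PySem.Dict.keys_insert_of_contains _ _ hc]
  · rfl

lemma bump_getD (cov : PySem.Dict Int Int) (k k' : Int) :
    (pvBumpA cov k).getD k' 0
      = cov.getD k' 0 + (if cov.contains k' = true ∧ k' = k then 1 else 0) := by
  unfold pvBumpA
  split
  · rename_i hc
    rw [PySem.Dict.getD_modify]
    by_cases h : k' = k
    · subst h; simp [hc]
    · simp [h]
  · rename_i hc
    by_cases h : k' = k
    · subst h; simp [hc]
    · simp [h]

-- the inner `for k in present` loop: one guarded increment per distinct element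
lemma foldl_bump_contains (pres : List Int) (cov : PySem.Dict Int Int) (k : Int) :
    (pres.foldl pvBumpA cov).contains k = cov.contains k := by
  induction pres generalizing cov with
  | nil => rfl
  | cons h t ih => simp only [List.foldl_cons, ih, bump_contains]

lemma foldl_bump_keys (pres : List Int) (cov : PySem.Dict Int Int) :
    (pres.foldl pvBumpA cov).keys = cov.keys := by
  induction pres generalizing cov with
  | nil => rfl
  | cons h t ih => simp only [List.foldl_cons, ih, bump_keys]

lemma foldl_bump_getD (pres : List Int) (hnd : pres.Nodup) (cov : PySem.Dict Int Int) (k : Int) :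
    (pres.foldl pvBumpA cov).getD k 0
      = cov.getD k 0 + (if cov.contains k = true ∧ k ∈ pres then 1 else 0) := by
  induction pres generalizing cov with
  | nil => simp
  | cons h t ih =>
      rcases List.nodup_cons.mp hnd with ⟨hnt, hndt⟩
      simp only [List.foldl_cons]
      rw [ih hndt, bump_getD, bump_contains]
      by_cases hk : k = h
      · subst hk
        by_cases hc : cov.contains k = true <;> simp [hc, hnt]
      · simp [hk, List.mem_cons]

-- A's outer loop over subarrays: keys stay fixed, each entry counts its detecting subarrays
lemma foldl_step_keys_eq (items : List (Int × List Int))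
    (arr : PySem.Dict Int (PySem.Dict Int Int)) (cov : PySem.Dict Int Int) :
    (items.foldl (fun cov p => (pvPresentA arr p.2).foldl pvBumpA cov) cov).keys = cov.keys := by
  induction items generalizing cov with
  | nil => rfl
  | cons p t ih => simp only [List.foldl_cons, ih, foldl_bump_keys]

lemma foldl_step_getD (items : List (Int × List Int))
    (arr : PySem.Dict Int (PySem.Dict Int Int)) (cov : PySem.Dict Int Int) (k : Int) :
    (items.foldl (fun cov p => (pvPresentA arr p.2).foldl pvBumpA cov) cov).getD k 0
      = cov.getD k 0 +
        (if cov.contains k = true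
         then (items.countP (fun p => chansHit arr p.2 k) : Int) else 0) := by
  induction items generalizing cov with
  | nil => simp
  | cons p t ih =>
      simp only [List.foldl_cons]
      rw [ih, foldl_bump_contains,
        foldl_bump_getD _ (present_nodup arr p.2), List.countP_cons]
      by_cases hc : cov.contains k = true
      · by_cases hp : k ∈ pvPresentA arr p.2
        · have hb : chansHit arr p.2 k = true := (present_contains arr p.2 k).mp hp
          simp only [hc, hp, hb, and_true, if_pos]
          push_cast
          ring
        · have hb : chansHit arr p.2 k = false := by
            rcases Bool.eq_false_or_eq_true (chansHit arr p.2 k) with h | h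
            · exact absurd ((present_contains arr p.2 k).mpr h) hp
            · exact h
          simp [hc, hp, hb]
      · simp [hc]

-- keys and entries of A's initial zero dict
lemma keys_cov0 (pk : List Int) :
    (pk.foldl (fun d k => d.insert k 0) (PySem.Dict.empty : PySem.Dict Int Int)).keys
      = PySem.List.dedup pk := by
  rw [PySem.Dict.keys_foldl_insert pk (fun _ _ => (0 : Int)), PySem.List.dedup_eq_ofList]
  rfl

lemma getD_cov0 (pk : List Int) (k : Int) :
    (pk.foldl (fun d k => d.insert k 0) (PySem.Dict.empty : PySem.Dict Int Int)).getD k 0 = 0 := by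
  have h : ∀ (l : List Int) (d : PySem.Dict Int Int), d.getD k 0 = 0 →
      (l.foldl (fun d k => d.insert k 0) d).getD k 0 = 0 := by
    intro l
    induction l with
    | nil => intro d hd; simpa using hd
    | cons x t ih =>
        intro d hd
        refine ih _ ?_
        rw [PySem.Dict.getD_insert]
        split <;> simp [hd]
  exact h pk _ (by simp)

lemma dedup_nodup (pk : List Int) : (PySem.List.dedup pk).Nodup := by
  rw [PySem.List.dedup_eq_ofList]; exact PySem.Set.nodup_ofList pk

-- building a dict over distinct keys just lists the pairs
lemma items_ofList_fresh (keys : List Int) (f : Int → Int) (hnd : keys.Nodup) :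
    (PySem.Dict.ofList (keys.map (fun k => (k, f k)))).items = keys.map (fun k => (k, f k)) := by
  rw [show PySem.Dict.ofList (keys.map (fun k => (k, f k)))
        = (keys.map (fun k => (k, f k))).foldl (fun d p => d.insert p.1 p.2) PySem.Dict.empty from rfl,
    List.foldl_map]
  rw [PySem.Dict.items_foldl_insert_fresh keys (fun a => a) f PySem.Dict.empty
      (fun a _ => by simp) (by simpa using hnd)]
  rfl

-- A's coverage dict IS the normal form covN
lemma covA_eq_covN (arr : PySem.Dict Int (PySem.Dict Int Int)) (subs : PySem.Dict Int (List Int))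
    (pk : List Int) :
    pvCovA arr subs pk = covN arr subs pk := by
  have hkeys : (pvCovA arr subs pk).keys = PySem.List.dedup pk := by
    unfold pvCovA
    rw [foldl_step_keys_eq, keys_cov0]
  have hnd := dedup_nodup pk
  have hgetD : ∀ k ∈ PySem.List.dedup pk,
      (pvCovA arr subs pk).getD k 0 = cntK arr subs k := by
    intro k hk
    unfold pvCovA
    rw [foldl_step_getD, getD_cov0]
    have hc : (pk.foldl (fun d k => d.insert k 0) (PySem.Dict.empty : PySem.Dict Int Int)).contains k = true := by
      rw [PySem.Dict.contains_iff_mem_keys, keys_cov0]; exact hk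
    rw [if_pos hc]
    unfold cntK
    simp
  apply PySem.Dict.ext
  unfold covN
  rw [PySem.Dict.items_eq_map_keys _ (hkeys ▸ hnd) 0, hkeys, items_ofList_fresh _ _ hnd]
  exact List.map_congr_left (fun k hk => by rw [hgetD k hk])

-- nodup keys, keys and entry lookup of the normal form
lemma keys_covN (arr : PySem.Dict Int (PySem.Dict Int Int)) (subs : PySem.Dict Int (List Int))
    (pk : List Int) : (covN arr subs pk).keys = PySem.List.dedup pk := by
  unfold covN
  rw [show (PySem.Dict.ofList ((PySem.List.dedup pk).map (fun k => (k, cntK arr subs k)))).keys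
      = ((PySem.Dict.ofList ((PySem.List.dedup pk).map (fun k => (k, cntK arr subs k)))).items).map (·.1) from rfl,
    items_ofList_fresh _ _ (dedup_nodup pk), List.map_map]
  have hid : ((fun x : Int × Int => x.1) ∘ fun j => (j, cntK arr subs j)) = id := rfl
  rw [hid, List.map_id]

lemma covN_getD (arr : PySem.Dict Int (PySem.Dict Int Int)) (subs : PySem.Dict Int (List Int))
    (pk : List Int) (k : Int) (hk : k ∈ PySem.List.dedup pk) :
    (covN arr subs pk).getD k 0 = cntK arr subs k := by
  have hitems := items_ofList_fresh (PySem.List.dedup pk) (fun j => cntK arr subs j) (dedup_nodup pk)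
  refine PySem.Dict.getD_of_mem_items _ ?_ ?_ 0
  · rw [show (covN arr subs pk).items
        = (PySem.Dict.ofList ((PySem.List.dedup pk).map (fun j => (j, cntK arr subs j)))).items from rfl, hitems]
    exact List.mem_map.mpr ⟨k, hk, rfl⟩
  · rw [keys_covN]
    exact dedup_nodup pk

-- ===== B-side: the inverted index pvChanSubs =====

lemma chanSubs_inner_mem (chans : List Int) (sid : Int) (d : PySem.Dict Int (PySem.Set Int))
    (ch x : Int) :
    x ∈ (chans.foldl (fun d c => d.modify c PySem.Set.empty (fun s => s.add sid)) d).getD ch PySem.Set.empty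
      ↔ x ∈ d.getD ch PySem.Set.empty ∨ (ch ∈ chans ∧ x = sid) := by
  induction chans generalizing d with
  | nil => simp
  | cons c t ih =>
      simp only [List.foldl_cons, ih, PySem.Dict.getD_modify, List.mem_cons]
      by_cases h : ch = c
      · subst h
        rw [if_pos rfl, PySem.Set.mem_add]
        tauto
      · rw [if_neg h]
        tauto

lemma mem_chanSubs (subs : PySem.Dict Int (List Int)) (ch x : Int) :
    x ∈ (pvChanSubs subs).getD ch PySem.Set.empty
      ↔ ∃ p ∈ subs.items, ch ∈ p.2 ∧ x = p.1 := by
  unfold pvChanSubs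
  have h : ∀ (items : List (Int × List Int)) (d : PySem.Dict Int (PySem.Set Int)),
      x ∈ (items.foldl (fun d p => p.2.foldl (fun d c => d.modify c PySem.Set.empty (fun s => s.add p.1)) d) d).getD ch PySem.Set.empty
        ↔ x ∈ d.getD ch PySem.Set.empty ∨ ∃ p ∈ items, ch ∈ p.2 ∧ x = p.1 := by
    intro items
    induction items with
    | nil => simp
    | cons p t ih =>
        intro d
        simp only [List.foldl_cons, ih, chanSubs_inner_mem, List.mem_cons]
        constructor
        · rintro ((h1 | h1) | ⟨q, hq, hc, rfl⟩)
          · exact Or.inl h1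
          · exact Or.inr ⟨p, Or.inl rfl, h1.1, h1.2⟩
          · exact Or.inr ⟨q, Or.inr hq, hc, rfl⟩
        · rintro (h1 | ⟨q, (rfl | hq), hc, rfl⟩)
          · exact Or.inl (Or.inl h1)
          · exact Or.inl (Or.inr ⟨hc, rfl⟩)
          · exact Or.inr ⟨q, hq, hc, rfl⟩
  rw [h subs.items PySem.Dict.empty]
  simp

-- ===== B-side: the single pass building pvSeenB =====

lemma seen_inner_keys (pkts : List Int) (S : PySem.Set Int) (d : PySem.Dict Int (PySem.Set Int)) :
    (pkts.foldl (fun d k => if d.contains k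
        then d.modify k PySem.Set.empty (fun s => PySem.Set.update s S) else d) d).keys = d.keys := by
  induction pkts generalizing d with
  | nil => rfl
  | cons h t ih =>
      rw [List.foldl_cons, ih]
      split
      · rename_i hc
        rw [PySem.Dict.keys_modify, PySem.Dict.keys_insert_of_contains _ _ hc]
      · rfl

lemma seen_inner_contains (pkts : List Int) (S : PySem.Set Int) (d : PySem.Dict Int (PySem.Set Int)) (k : Int) :
    (pkts.foldl (fun d k => if d.contains k
        then d.modify k PySem.Set.empty (fun s => PySem.Set.update s S) else d) d).contains k = d.contains k := by
  rw [PySem.Dict.contains_eq_decide_mem_keys, PySem.Dict.contains_eq_decide_mem_keys, seen_inner_keys]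

lemma seen_inner_mem (pkts : List Int) (S : PySem.Set Int) (d : PySem.Dict Int (PySem.Set Int)) (k x : Int) :
    x ∈ (pkts.foldl (fun d k => if d.contains k
        then d.modify k PySem.Set.empty (fun s => PySem.Set.update s S) else d) d).getD k PySem.Set.empty
      ↔ x ∈ d.getD k PySem.Set.empty ∨ (d.contains k = true ∧ k ∈ pkts ∧ x ∈ S) := by
  induction pkts generalizing d with
  | nil => simp
  | cons h t ih =>
      rw [List.foldl_cons, ih]
      by_cases hc : d.contains h = true
      · rw [if_pos hc]
        have hck : ∀ k', (d.modify h PySem.Set.empty (fun s => PySem.Set.update s S)).contains k' = d.contains k' := by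
          intro k'
          rw [PySem.Dict.contains_modify]
          by_cases hkh : k' = h
          · subst hkh; simp [hc]
          · simp [hkh]
        rw [hck k, PySem.Dict.getD_modify]
        by_cases hkh : k = h
        · subst hkh
          rw [if_pos rfl, PySem.Set.mem_update]
          simp only [List.mem_cons, true_or, hc, true_and]
          tauto
        · simp only [if_neg hkh, List.mem_cons]
          constructor
          · rintro (h1 | ⟨h2, h3, h4⟩)
            · exact Or.inl h1
            · exact Or.inr ⟨h2, Or.inr h3, h4⟩
          · rintro (h1 | ⟨h2, (rfl | h3), h4⟩)
            · exact Or.inl h1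
            · exact absurd rfl hkh
            · exact Or.inr ⟨h2, h3, h4⟩
      · rw [if_neg hc, List.mem_cons]
        constructor
        · rintro (h1 | ⟨h2, h3, h4⟩)
          · exact Or.inl h1
          · exact Or.inr ⟨h2, Or.inr h3, h4⟩
        · rintro (h1 | ⟨h2, (rfl | h3), h4⟩)
          · exact Or.inl h1
          · exact absurd h2 (by simpa using hc)
          · exact Or.inr ⟨h2, h3, h4⟩

lemma seen_inner_nodup (pkts : List Int) (S : PySem.Set Int) (d : PySem.Dict Int (PySem.Set Int))
    (hd : ∀ k, (d.getD k PySem.Set.empty).Nodup) (k : Int) :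
    ((pkts.foldl (fun d k => if d.contains k
        then d.modify k PySem.Set.empty (fun s => PySem.Set.update s S) else d) d).getD k PySem.Set.empty).Nodup := by
  induction pkts generalizing d with
  | nil => exact hd k
  | cons h t ih =>
      rw [List.foldl_cons]
      refine ih _ (fun k' => ?_)
      split
      · rw [PySem.Dict.getD_modify]
        split
        · exact PySem.Set.nodup_update _ _ (hd h)
        · exact hd k'
      · exact hd k'

lemma seen_outer_keys (qs : List (Int × PySem.Dict Int Int)) (cs : PySem.Dict Int (PySem.Set Int))
    (d : PySem.Dict Int (PySem.Set Int)) :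
    (qs.foldl (fun d q => q.2.keys.foldl
      (fun d k => if d.contains k
        then d.modify k PySem.Set.empty (fun s => PySem.Set.update s (cs.getD q.1 PySem.Set.empty))
        else d) d) d).keys = d.keys := by
  induction qs generalizing d with
  | nil => rfl
  | cons q t ih => rw [List.foldl_cons, ih, seen_inner_keys]

lemma seen_outer_mem (qs : List (Int × PySem.Dict Int Int)) (cs : PySem.Dict Int (PySem.Set Int))
    (d : PySem.Dict Int (PySem.Set Int)) (k x : Int) :
    x ∈ (qs.foldl (fun d q => q.2.keys.foldl
      (fun d k => if d.contains k
        then d.modify k PySem.Set.empty (fun s => PySem.Set.update s (cs.getD q.1 PySem.Set.empty))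
        else d) d) d).getD k PySem.Set.empty
      ↔ x ∈ d.getD k PySem.Set.empty ∨
        (d.contains k = true ∧ ∃ q ∈ qs, k ∈ q.2.keys ∧ x ∈ cs.getD q.1 PySem.Set.empty) := by
  induction qs generalizing d with
  | nil => simp
  | cons q t ih =>
      rw [List.foldl_cons, ih, seen_inner_contains, seen_inner_mem]
      simp only [List.mem_cons]
      constructor
      · rintro ((h1 | ⟨h2, h3, h4⟩) | ⟨h2, p, hp, h3, h4⟩)
        · exact Or.inl h1
        · exact Or.inr ⟨h2, q, Or.inl rfl, h3, h4⟩
        · exact Or.inr ⟨h2, p, Or.inr hp, h3, h4⟩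
      · rintro (h1 | ⟨h2, p, (rfl | hp), h3, h4⟩)
        · exact Or.inl (Or.inl h1)
        · exact Or.inl (Or.inr ⟨h2, h3, h4⟩)
        · exact Or.inr ⟨h2, p, hp, h3, h4⟩

lemma seen_outer_nodup (qs : List (Int × PySem.Dict Int Int)) (cs : PySem.Dict Int (PySem.Set Int))
    (d : PySem.Dict Int (PySem.Set Int)) (hd : ∀ k, (d.getD k PySem.Set.empty).Nodup) (k : Int) :
    ((qs.foldl (fun d q => q.2.keys.foldl
      (fun d k => if d.contains k
        then d.modify k PySem.Set.empty (fun s => PySem.Set.update s (cs.getD q.1 PySem.Set.empty))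
        else d) d) d).getD k PySem.Set.empty).Nodup := by
  induction qs generalizing d with
  | nil => exact hd k
  | cons q t ih =>
      rw [List.foldl_cons]
      exact ih _ (fun k' => seen_inner_nodup _ _ _ hd k')

-- the empty-set dict seen0
lemma keys_seen0 (pk : List Int) :
    (pk.foldl (fun d k => d.insert k PySem.Set.empty) (PySem.Dict.empty : PySem.Dict Int (PySem.Set Int))).keys
      = PySem.List.dedup pk := by
  rw [PySem.Dict.keys_foldl_insert pk (fun _ _ => (PySem.Set.empty : PySem.Set Int)), PySem.List.dedup_eq_ofList]
  rfl

lemma getD_seen0 (pk : List Int) (k : Int) :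
    (pk.foldl (fun d k => d.insert k PySem.Set.empty) (PySem.Dict.empty : PySem.Dict Int (PySem.Set Int))).getD k PySem.Set.empty
      = PySem.Set.empty := by
  have h : ∀ (l : List Int) (d : PySem.Dict Int (PySem.Set Int)), d.getD k PySem.Set.empty = PySem.Set.empty →
      (l.foldl (fun d k => d.insert k PySem.Set.empty) d).getD k PySem.Set.empty = PySem.Set.empty := by
    intro l
    induction l with
    | nil => intro d hd; simpa using hd
    | cons x t ih =>
        intro d hd
        refine ih _ ?_
        rw [PySem.Dict.getD_insert]
        split
        · rfl
        · exact hd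
  exact h pk _ (by simp)

lemma keys_seenB (arr : PySem.Dict Int (PySem.Dict Int Int)) (cs : PySem.Dict Int (PySem.Set Int))
    (pk : List Int) : (pvSeenB arr cs pk).keys = PySem.List.dedup pk := by
  unfold pvSeenB
  rw [seen_outer_keys, keys_seen0]

lemma nodup_seenB_getD (arr : PySem.Dict Int (PySem.Dict Int Int)) (cs : PySem.Dict Int (PySem.Set Int))
    (pk : List Int) (k : Int) : ((pvSeenB arr cs pk).getD k PySem.Set.empty).Nodup := by
  unfold pvSeenB
  exact seen_outer_nodup _ _ _ (fun k' => by rw [getD_seen0]; exact List.nodup_nil) k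

lemma mem_seenB (arr : PySem.Dict Int (PySem.Dict Int Int)) (cs : PySem.Dict Int (PySem.Set Int))
    (pk : List Int) (k x : Int) (hk : k ∈ PySem.List.dedup pk) :
    x ∈ (pvSeenB arr cs pk).getD k PySem.Set.empty
      ↔ ∃ q ∈ arr.items, k ∈ q.2.keys ∧ x ∈ cs.getD q.1 PySem.Set.empty := by
  unfold pvSeenB
  rw [seen_outer_mem, getD_seen0]
  have hc : (pk.foldl (fun d k => d.insert k PySem.Set.empty) (PySem.Dict.empty : PySem.Dict Int (PySem.Set Int))).contains k = true := by
    rw [PySem.Dict.contains_iff_mem_keys, keys_seen0]; exact hk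
  simp only [PySem.Set.empty] at hc ⊢
  simp [hc]

-- a dict with Nodup keys: membership of (ch, ·) among the items is exactly the getD lookup
lemma arrItems_iff (d : PySem.Dict Int (PySem.Dict Int Int)) (hnd : d.keys.Nodup) (ch k : Int) :
    (∃ q ∈ d.items, q.1 = ch ∧ k ∈ q.2.keys)
      ↔ (d.getD ch PySem.Dict.empty).contains k = true := by
  constructor
  · rintro ⟨q, hq, rfl, hk⟩
    have : d.getD q.1 PySem.Dict.empty = q.2 := PySem.Dict.getD_of_mem_items d hq hnd _
    rw [this, PySem.Dict.contains_iff_mem_keys]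
    exact hk
  · intro hk
    by_cases hc : d.contains ch = true
    · have hs : (d.get? ch).isSome := by rw [← PySem.Dict.contains_eq_isSome_get?]; exact hc
      obtain ⟨v, hv⟩ := Option.isSome_iff_exists.mp hs
      refine ⟨(ch, v), PySem.Dict.mem_items_of_get?_eq_some d hv, rfl, ?_⟩
      rw [← PySem.Dict.contains_iff_mem_keys]
      rwa [PySem.Dict.getD_of_get?_eq_some d PySem.Dict.empty hv] at hk
    · rw [PySem.Dict.getD_of_not_contains _ _ (by simpa using hc)] at hk
      simp at hk

-- the length of B's seen-set is A's subarray count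
lemma len_seenB (arr : PySem.Dict Int (PySem.Dict Int Int)) (subs : PySem.Dict Int (List Int))
    (hnda : arr.keys.Nodup) (hnds : subs.keys.Nodup)
    (pk : List Int) (k : Int) (hk : k ∈ PySem.List.dedup pk) :
    PySem.Set.len ((pvSeenB arr (pvChanSubs subs) pk).getD k PySem.Set.empty) = cntK arr subs k := by
  have hmem : ∀ x, x ∈ (pvSeenB arr (pvChanSubs subs) pk).getD k PySem.Set.empty
      ↔ x ∈ (subs.items.filter (fun p => chansHit arr p.2 k)).map (·.1) := by
    intro x
    rw [mem_seenB arr _ pk k x hk]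
    simp only [mem_chanSubs, List.mem_map, List.mem_filter]
    constructor
    · rintro ⟨q, hq, hkq, p, hp, hch, rfl⟩
      refine ⟨p, ⟨hp, ?_⟩, rfl⟩
      unfold chansHit
      rw [List.any_eq_true]
      exact ⟨q.1, hch, (arrItems_iff arr hnda q.1 k).mp ⟨q, hq, rfl, hkq⟩⟩
    · rintro ⟨p, ⟨hp, hhit⟩, rfl⟩
      unfold chansHit at hhit
      rw [List.any_eq_true] at hhit
      obtain ⟨ch, hch, hcontains⟩ := hhit
      obtain ⟨q, hq, hq1, hkq⟩ := (arrItems_iff arr hnda ch k).mpr hcontains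
      exact ⟨q, hq, hkq, p, hp, hq1 ▸ hch, rfl⟩
  have hnd1 : ((pvSeenB arr (pvChanSubs subs) pk).getD k PySem.Set.empty).Nodup :=
    nodup_seenB_getD arr _ pk k
  have hnd2 : ((subs.items.filter (fun p => chansHit arr p.2 k)).map (·.1)).Nodup := by
    have hsub : ((subs.items.filter (fun p => chansHit arr p.2 k)).map (·.1)).Sublist (subs.items.map (·.1)) :=
      (List.filter_sublist).map _
    exact hnds.sublist hsub
  have hperm := (List.perm_ext_iff_of_nodup hnd1 hnd2).mpr hmem
  have hlen := hperm.length_eq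
  unfold cntK
  rw [show PySem.Set.len ((pvSeenB arr (pvChanSubs subs) pk).getD k PySem.Set.empty)
      = (((pvSeenB arr (pvChanSubs subs) pk).getD k PySem.Set.empty).length : Int) from rfl,
    hlen, List.length_map, ← List.countP_eq_length_filter]

-- B's cov dict is also the normal form covN
lemma covAlt_eq_covN (arr : PySem.Dict Int (PySem.Dict Int Int)) (subs : PySem.Dict Int (List Int))
    (hnda : arr.keys.Nodup) (hnds : subs.keys.Nodup) (pk : List Int) :
    PySem.Dict.ofList ((pvSeenB arr (pvChanSubs subs) pk).items.map (fun p => (p.1, PySem.Set.len p.2)))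
      = covN arr subs pk := by
  have hnd := dedup_nodup pk
  have hitems : (pvSeenB arr (pvChanSubs subs) pk).items
      = (PySem.List.dedup pk).map (fun k => (k, (pvSeenB arr (pvChanSubs subs) pk).getD k PySem.Set.empty)) := by
    rw [PySem.Dict.items_eq_map_keys _ ((keys_seenB arr _ pk) ▸ hnd) PySem.Set.empty, keys_seenB]
  rw [hitems, List.map_map]
  unfold covN
  congr 1
  refine List.map_congr_left (fun k hk => ?_)
  simp only [Function.comp_apply]
  rw [len_seenB arr subs hnda hnds pk k hk]

-- the ranked lists coincide (common pk)
lemma ranked_eq (arr : PySem.Dict Int (PySem.Dict Int Int)) (subs : PySem.Dict Int (List Int))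
    (pk : List Int) (ms : Int) :
    PySem.List.sorted
      (((pvCovA arr subs pk).items.filter (fun p => decide (ms ≤ p.2))).map (·.1))
      (fun k => (pvCovA arr subs pk).getD k 0) true
    = PySem.List.sorted
      ((covN arr subs pk).keys.filter (fun k => decide (ms ≤ (covN arr subs pk).getD k 0)))
      (fun k => (covN arr subs pk).getD k 0) true := by
  have hnd := dedup_nodup pk
  rw [covA_eq_covN]
  congr 1
  rw [keys_covN]
  rw [show (covN arr subs pk).items
      = (PySem.Dict.ofList ((PySem.List.dedup pk).map (fun j => (j, cntK arr subs j)))).items from rfl,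
    items_ofList_fresh _ _ hnd, List.filter_map, List.map_map]
  have hid : ((fun x : Int × Int => x.1) ∘ fun j => (j, cntK arr subs j)) = id := rfl
  rw [hid, List.map_id]
  refine List.filter_congr ?_
  intro k hk
  rw [covN_getD arr subs pk k hk]
  rfl

-- ===== VERDICT (by name: the statement is the Claim_ definition above) =====
theorem select_packets_by_coverage_spec : Claim_equal_select_packets_by_coverage := by
  intro arrivals subarrays min_subarrays limit packet_indices _
  unfold Spec_select_packets_by_coverage
  unfold select_packets_by_coverage select_packets_by_coverage_alt
  have hnda : (pvArrOf arrivals).keys.Nodup := PySem.Dict.nodup_keys_ofList _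
  have hnds : (PySem.Dict.ofList subarrays : PySem.Dict Int (List Int)).keys.Nodup :=
    PySem.Dict.nodup_keys_ofList _
  cases packet_indices with
  | none =>
      simp only [pkAll_eq, covAlt_eq_covN _ _ hnda hnds]
      cases limit with
      | none => exact ranked_eq _ _ _ _
      | some l => exact congrArg (fun r => PySem.List.slice r none (some l)) (ranked_eq _ _ _ _)
  | some pk =>
      simp only [covAlt_eq_covN _ _ hnda hnds]
      cases limit with
      | none => exact ranked_eq _ _ _ _
      | some l => exact congrArg (fun r => PySem.List.slice r none (some l)) (ranked_eq _ _ _ _)
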